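-- pv_equiv track=rewrite | github.com/TanviRuhika/ExplainMyLogs | fedora_log_extractor.py | _get_time_range
-- ===== SOURCE A (Python) =====
-- from typing import Dict, List, Optional
--
-- def _get_time_range(logs: List[Dict]) -> Dict[str, str]:
--     """Get time range of logs."""
--     if not logs:
--         return {'earliest': None, 'latest': None}
--
--     timestamps = [log['timestamp'] for log in logs if log.get('timestamp')]
--     if not timestamps:
--         return {'earliest': None, 'latest': None}
--
--     return {
--         'earliest': min(timestamps),
--         'latest': max(timestamps)
--     }
-- ===== SOURCE B (Python) =====
-- from typing import Dict, List, Optional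
--
-- def _get_time_range(logs: List[Dict]) -> Dict[str, str]:
--     """Get time range of logs: one pass maintaining running extrema."""
--     earliest = None
--     latest = None
--     for log in logs:
--         ts = log.get('timestamp')
--         if not ts:
--             continue
--         if earliest is None:
--             earliest = ts
--             latest = ts
--         else:
--             if ts < earliest:
--                 earliest = ts
--             if ts > latest:
--                 latest = ts
--     return {'earliest': earliest, 'latest': latest}
-- ===== Notes on version B (the rewrite author's own statement) =====
-- stated objective: simpler
-- what changed: Replaces the filtered list comprehension plus separate min() and max() scans with a single pass over the logs maintaining two running extrema, never materialising the timestamp list.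
import Mathlib
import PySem

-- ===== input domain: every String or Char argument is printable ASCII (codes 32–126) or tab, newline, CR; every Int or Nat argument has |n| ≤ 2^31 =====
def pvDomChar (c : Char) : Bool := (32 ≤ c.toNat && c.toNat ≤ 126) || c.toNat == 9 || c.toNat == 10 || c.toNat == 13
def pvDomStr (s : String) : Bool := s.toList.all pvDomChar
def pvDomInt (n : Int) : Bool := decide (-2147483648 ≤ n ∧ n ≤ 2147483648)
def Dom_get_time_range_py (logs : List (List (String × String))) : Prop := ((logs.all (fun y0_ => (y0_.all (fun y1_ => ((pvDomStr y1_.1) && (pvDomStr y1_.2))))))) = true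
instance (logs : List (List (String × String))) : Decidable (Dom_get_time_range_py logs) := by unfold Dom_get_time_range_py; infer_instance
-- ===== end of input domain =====

-- B builds the same answer in one pass with two running extrema instead of a filtered list scanned twice by min and max (objective: simpler).

-- ===== PORT A =====
-- log.get('timestamp') truthy test and log['timestamp'] on dicts that pass it: both are getD "timestamp" "" (missing and "" are equally falsy).
def get_time_range_py (logs : List (List (String × String))) : List (String × Option String) :=
  if logs = [] then [("earliest", none), ("latest", none)]
  else
    let timestamps :=
      (logs.filter (fun log => (PySem.Dict.ofList log).getD "timestamp" "" ≠ "")).map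
        (fun log => (PySem.Dict.ofList log).getD "timestamp" "")
    if timestamps = [] then [("earliest", none), ("latest", none)]
    else [("earliest", PySem.List.min? timestamps (fun x => x)),
          ("latest",  PySem.List.max? timestamps (fun x => x))]

-- ===== PORT B =====
def get_time_range_py_alt (logs : List (List (String × String))) : List (String × Option String) :=
  let p :=
    logs.foldl (fun (acc : Option String × Option String) log =>
      let ts := (PySem.Dict.ofList log).getD "timestamp" ""
      if ts = "" then acc
      else
        match acc with
        | (none, _) => (some ts, some ts)
        | (some e, some l) =>
            (some (if ts < e then ts else e), some (if l < ts then ts else l))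
        | (some e, none) => (some e, none)) (none, none)
  [("earliest", p.1), ("latest", p.2)]

-- ===== PRECONDITION & SPEC =====
def Spec_get_time_range_py (logs : List (List (String × String))) (out : List (String × Option String)) : Prop := out = get_time_range_py_alt logs
instance (logs : List (List (String × String))) (out : List (String × Option String)) : Decidable (Spec_get_time_range_py logs out) := by unfold Spec_get_time_range_py; infer_instance

-- ===== CLAIM (what is proved, stated in full; the proofs are below) =====
def Claim_equal_get_time_range_py : Prop := ∀ (logs : List (List (String × String))), Dom_get_time_range_py logs → Spec_get_time_range_py logs (get_time_range_py logs)

-- ===== LEMMAS AND PROOFS =====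

def pvTs (log : List (String × String)) : String := (PySem.Dict.ofList log).getD "timestamp" ""

def pvStep2 (acc : Option String × Option String) (ts : String) : Option String × Option String :=
  match acc with
  | (none, _) => (some ts, some ts)
  | (some e, some l) => (some (if ts < e then ts else e), some (if l < ts then ts else l))
  | (some e, none) => (some e, none)

-- B's fold over logs equals the same fold over the filtered-mapped timestamps list.
theorem pv_fold_filter (logs : List (List (String × String))) (acc : Option String × Option String) :
    logs.foldl (fun acc log =>
      let ts := (PySem.Dict.ofList log).getD "timestamp" ""
      if ts = "" then acc
      else
        match acc with
        | (none, _) => (some ts, some ts)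
        | (some e, some l) =>
            (some (if ts < e then ts else e), some (if l < ts then ts else l))
        | (some e, none) => (some e, none)) acc
    = ((logs.filter (fun log => pvTs log ≠ "")).map pvTs).foldl pvStep2 acc := by
  induction logs generalizing acc with
  | nil => rfl
  | cons h t ih =>
    by_cases hts : pvTs h = ""
    · simp [List.foldl, List.filter, pvTs] at *
      simp [hts, ih]
    · simp only [List.foldl, List.filter]
      rw [show (decide (pvTs h ≠ "")) = true by simp [hts]]
      simp only [List.map, List.foldl]
      rw [← ih]
      congr 1
      simp [pvTs] at hts ⊢
      simp [hts, pvStep2]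

-- running-extrema fold on a both-some accumulator computes the running min and max.
theorem pv_step2_minmax (t : List String) (e l : String) :
    t.foldl pvStep2 (some e, some l) = (some (t.foldl min e), some (t.foldl max l)) := by
  induction t generalizing e l with
  | nil => rfl
  | cons x xs ih =>
    simp only [List.foldl]
    have h1 : (if x < e then x else e) = min e x := by
      split_ifs with h
      · exact (min_eq_right h.le).symm
      · exact (min_eq_left (not_lt.mp h)).symm
    have h2 : (if l < x then x else l) = max l x := by
      split_ifs with h
      · exact (max_eq_right h.le).symm
      · exact (max_eq_left (not_lt.mp h)).symm
    rw [show pvStep2 (some e, some l) x = (some (min e x), some (max l x)) by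
          simp only [pvStep2]; rw [h1, h2]]
    exact ih _ _

theorem pv_main (logs : List (List (String × String))) :
    get_time_range_py logs = get_time_range_py_alt logs := by
  simp only [get_time_range_py, get_time_range_py_alt]
  rw [pv_fold_filter]
  by_cases hnil : logs = []
  · subst hnil; rfl
  · rw [if_neg hnil]
    have hA : ((logs.filter (fun log => (PySem.Dict.ofList log).getD "timestamp" "" ≠ "")).map
        (fun log => (PySem.Dict.ofList log).getD "timestamp" ""))
        = (logs.filter (fun log => pvTs log ≠ "")).map pvTs := rfl
    rw [hA]
    rcases hts : (logs.filter (fun log => pvTs log ≠ "")).map pvTs with _ | ⟨x, t⟩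
    · rfl
    · rw [if_neg (by simp)]
      simp only [List.foldl]
      rw [show pvStep2 (none, none) x = (some x, some x) from rfl, pv_step2_minmax,
        PySem.List.min?_id_cons, PySem.List.max?_id_cons]

-- ===== VERDICT (by name: the statement is the Claim_ definition above) =====
theorem get_time_range_py_spec : Claim_equal_get_time_range_py := by
  intro logs _
  unfold Spec_get_time_range_py
  exact pv_main logs
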